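-- pv_equiv track=rewrite | github.com/qnetics/COMPFEST12_CTF | Crypto/Soal 2/prob.py | f
-- ===== SOURCE A (Python) =====
-- def f(n):
--     c = 0
--     for i in range(2, n):
--         if (n^0 == n):
--             if (n*n // n == n):
--                 if (2*n != n-1):
--                     if (n**0 + 1 != 1):
--                         m = n
--                         while (m > 0):
--                             m -= i
--                         if (m == 0):
--                             c += 1
--     if (c == 1):
--         return True
--     else:
--         return False
-- ===== SOURCE B (Python) =====
-- def f(n):
--     # True iff n is the square of a prime: trial-divide up to sqrt(n).
--     if n < 4:
--         return False
--     d = 2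
--     while d * d < n:
--         if n % d == 0:
--             return False
--         d += 1
--     return d * d == n
-- ===== Notes on version B (the rewrite author's own statement) =====
-- stated objective: faster
-- what changed: Replaced the full scan over all i in [2,n) with an inner repeated-subtraction divisibility test by trial division up to sqrt(n) that stops at the first divisor.
import Mathlib
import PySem

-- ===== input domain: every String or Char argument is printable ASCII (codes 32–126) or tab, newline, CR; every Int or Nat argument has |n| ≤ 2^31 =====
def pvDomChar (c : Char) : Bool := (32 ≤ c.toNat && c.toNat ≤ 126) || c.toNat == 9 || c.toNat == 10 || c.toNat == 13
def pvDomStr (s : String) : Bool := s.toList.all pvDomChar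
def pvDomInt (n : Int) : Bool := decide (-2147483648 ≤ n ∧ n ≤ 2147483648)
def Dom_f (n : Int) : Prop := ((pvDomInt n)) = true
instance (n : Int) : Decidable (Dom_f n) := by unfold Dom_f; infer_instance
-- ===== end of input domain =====

-- B replaces A's scan of all i in [2,n) (each tested by repeated subtraction) with trial division up to sqrt(n); return value only, no side effects.

-- ===== PORT A =====
-- Python's 'while m > 0: m -= i'.  Structural recursion on a fuel of m.toNat
-- steps: inside A, i comes from range(2, n) so i ≥ 2 > 0 and m.toNat steps always suffice.
def whileSubAux : Nat → Int → Int → Int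
  | 0, m, _ => m
  | Nat.succ k, m, i => if 0 < m then whileSubAux k (m - i) i else m

def whileSub (m i : Int) : Int := whileSubAux m.toNat m i

def f (n : Int) : Bool :=
  ((PySem.List.pyRange 2 n 1).foldl (fun c i =>
    if PySem.Int.bxor n 0 = n then
      if PySem.Int.floordiv (n * n) n = n then
        if 2 * n ≠ n - 1 then
          if n ^ (0 : Nat) + 1 ≠ 1 then
            (if whileSub n i = 0 then c + 1 else c)
          else c
        else c
      else c
    else c) (0 : Int)) == 1

-- ===== PORT B =====
-- B's 'while d*d < n' loop, structural recursion on fuel: started with d = 2 and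
-- fuel (n-2).toNat, the guard d*d < n is always false once the fuel is exhausted.
def trialAux : Nat → Int → Int → Bool
  | 0, _n, d => d * d == _n
  | Nat.succ k, n, d =>
    if d * d < n then
      if PySem.Int.mod n d = 0 then false else trialAux k n (d + 1)
    else d * d == n

def f_alt (n : Int) : Bool :=
  if n < 4 then false else trialAux (n - 2).toNat n 2

-- ===== PRECONDITION & SPEC =====
def Spec_f (n : Int) (out : Bool) : Prop := out = f_alt n
instance (n : Int) (out : Bool) : Decidable (Spec_f n out) := by unfold Spec_f; infer_instance

-- ===== CLAIM (what is proved, stated in full; the proofs are below) =====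
def Claim_equal_f : Prop := ∀ (n : Int), Dom_f n → Spec_f n (f n)

-- ===== LEMMAS AND PROOFS =====

-- A's inner while-loop ends exactly at 0 iff i divides m (for m ≥ 0, i > 0).
theorem whileSubAux_of_nonpos (k : Nat) (m i : Int) (h : ¬ 0 < m) :
    whileSubAux k m i = m := by
  cases k <;> simp [whileSubAux, h]

theorem whileSubAux_eq_zero_iff (i : Int) (hi : 0 < i) :
    ∀ (k : Nat) (m : Int), m.toNat ≤ k → 0 ≤ m → (whileSubAux k m i = 0 ↔ i ∣ m) := by
  intro k
  induction k with
  | zero =>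
    intro m hk hm
    have hm0 : m = 0 := by omega
    subst hm0
    simp [whileSubAux]
  | succ k ih =>
    intro m hk hm
    by_cases hpos : 0 < m
    · rw [show whileSubAux (k + 1) m i
          = if 0 < m then whileSubAux k (m - i) i else m from rfl, if_pos hpos]
      by_cases hge : i ≤ m
      · rw [ih (m - i) (by omega) (by omega)]
        constructor
        · intro hd
          have := dvd_add hd (dvd_refl i)
          simpa using this
        · intro hd
          exact dvd_sub hd (dvd_refl i)
      · -- 0 < m < i : one more subtraction lands strictly below 0
        rw [whileSubAux_of_nonpos k (m - i) i (by omega)]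
        constructor
        · intro h; exact absurd h (by omega)
        · intro hd
          have := Int.le_of_dvd hpos hd
          omega
    · rw [show whileSubAux (k + 1) m i
          = if 0 < m then whileSubAux k (m - i) i else m from rfl, if_neg hpos]
      have hm0 : m = 0 := by omega
      subst hm0
      simp

theorem whileSub_eq_zero_iff (m i : Int) (hi : 0 < i) (hm : 0 ≤ m) :
    whileSub m i = 0 ↔ i ∣ m :=
  whileSubAux_eq_zero_iff i hi m.toNat m le_rfl hm

-- The common mathematical middle: n = p² for the least nontrivial divisor p.
def SqOfLeast (n : Int) : Prop :=
  ∃ p, 2 ≤ p ∧ p * p = n ∧ ∀ q, 2 ≤ q → q < p → ¬ q ∣ n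

-- countP = 1 on a Nodup list means: exactly one member satisfies p.
theorem countP_eq_one_iff {α : Type} (l : List α) (p : α → Bool) (hl : l.Nodup) :
    l.countP p = 1 ↔ ∃ a ∈ l, p a = true ∧ ∀ b ∈ l, p b = true → b = a := by
  induction l with
  | nil => simp
  | cons x xs ih =>
    have hx : x ∉ xs := (List.nodup_cons.mp hl).1
    have hxs : xs.Nodup := (List.nodup_cons.mp hl).2
    rw [List.countP_cons]
    by_cases hpx : p x = true
    · rw [if_pos hpx]
      constructor
      · intro h
        have h0 : ∀ b ∈ xs, ¬ p b = true := List.countP_eq_zero.mp (by omega)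
        refine ⟨x, List.mem_cons_self, hpx, ?_⟩
        intro b hb hpb
        rcases List.mem_cons.mp hb with h | h
        · exact h
        · exact absurd hpb (h0 b h)
      · rintro ⟨a, ha, hpa, hu⟩
        have h0 : xs.countP p = 0 := by
          rw [List.countP_eq_zero]
          intro b hb hpb
          have hba : b = a := hu b (List.mem_cons_of_mem x hb) hpb
          have hxa : x = a := hu x List.mem_cons_self hpx
          rw [hba, ← hxa] at hb
          exact hx hb
        omega
    · rw [if_neg hpx, add_zero, ih hxs]
      constructor
      · rintro ⟨a, ha, hpa, hu⟩
        refine ⟨a, List.mem_cons_of_mem x ha, hpa, ?_⟩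
        intro b hb hpb
        rcases List.mem_cons.mp hb with h | h
        · subst h; exact absurd hpb hpx
        · exact hu b h hpb
      · rintro ⟨a, ha, hpa, hu⟩
        rcases List.mem_cons.mp ha with h | h
        · subst h; exact absurd hpa hpx
        · exact ⟨a, h, hpa, fun b hb hpb => hu b (List.mem_cons_of_mem x hb) hpb⟩

-- Exactly one proper divisor in [2, n) ↔ n = p² for the least nontrivial divisor p.
theorem unique_divisor_iff_sqOfLeast (n : Int) (hn : 3 ≤ n) :
    (∃ a, (2 ≤ a ∧ a < n) ∧ a ∣ n ∧ ∀ b, 2 ≤ b → b < n → b ∣ n → b = a) ↔ SqOfLeast n := by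
  constructor
  · rintro ⟨a, ⟨ha2, han⟩, hdvd, huniq⟩
    obtain ⟨b, hab⟩ := hdvd
    have hbpos : 0 < b := by
      by_contra h
      push Not at h
      nlinarith
    have hb2 : 2 ≤ b := by
      by_contra h
      push Not at h
      have hb1 : b = 1 := by omega
      rw [hb1, mul_one] at hab
      omega
    have hbn : b < n := by
      have h2b : 2 * b ≤ a * b := mul_le_mul_of_nonneg_right ha2 (by omega)
      linarith
    have hbdvd : b ∣ n := ⟨a, by rw [hab]; ring⟩
    have hba : b = a := huniq b hb2 hbn hbdvd
    refine ⟨a, ha2, by rw [hab, hba], ?_⟩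
    intro q hq2 hqa hqdvd
    exact absurd (huniq q hq2 (by omega) hqdvd) (by omega)
  · rintro ⟨p, hp2, hpp, hmin⟩
    have hpn : p < n := by
      have h2p : 2 * p ≤ p * p := mul_le_mul_of_nonneg_right hp2 (by omega)
      linarith
    refine ⟨p, ⟨hp2, hpn⟩, ⟨p, hpp.symm⟩, ?_⟩
    intro b hb2 hbn hbdvd
    by_contra hne
    rcases lt_or_gt_of_ne hne with hlt | hgt
    · exact hmin b hb2 hlt hbdvd
    · obtain ⟨c, hc⟩ := hbdvd
      have hcpos : 0 < c := by
        by_contra h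
        push Not at h
        nlinarith
      have hc2 : 2 ≤ c := by
        by_contra h
        push Not at h
        have hc1 : c = 1 := by omega
        rw [hc1, mul_one] at hc
        omega
      have hcp : c < p := by
        by_contra h
        push Not at h
        have h1 : p * p < b * p := mul_lt_mul_of_pos_right hgt (by omega)
        have h2 : b * p ≤ b * c := mul_le_mul_of_nonneg_left h (by omega)
        linarith
      exact hmin c hc2 hcp ⟨b, by rw [hc]; ring⟩

-- the loop-exit test d*d == n, when d*d ≥ n ≥ ... : true iff d itself witnesses SqOfLeast from d.
theorem sqHit_iff (n d : Int) (hd : 0 < d) (hge : n ≤ d * d) :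
    ((d * d == n) = true) ↔ (∃ p, d ≤ p ∧ p * p = n ∧ ∀ q, d ≤ q → q < p → ¬ q ∣ n) := by
  constructor
  · intro h
    have hdd : d * d = n := beq_iff_eq.mp h
    exact ⟨d, le_rfl, hdd, fun q hq hqd => by omega⟩
  · rintro ⟨p, hdp, hpp, hmin⟩
    have hle : d * d ≤ p * p := by nlinarith
    have hdn : d * d = n := by nlinarith
    exact beq_iff_eq.mpr hdn

-- B's loop returns true iff the least divisor ≥ d of n squares to n.
theorem trialAux_eq_true_iff :
    ∀ (k : Nat) (n d : Int), 0 < d → n ≤ d + k →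
      (trialAux k n d = true ↔ ∃ p, d ≤ p ∧ p * p = n ∧ ∀ q, d ≤ q → q < p → ¬ q ∣ n) := by
  intro k
  induction k with
  | zero =>
    intro n d hd hk
    have hdd : d ≤ d * d := by nlinarith [mul_self_nonneg (d - 1)]
    exact sqHit_iff n d hd (by omega)
  | succ k ih =>
    intro n d hd hk
    rw [show trialAux (k + 1) n d
        = (if d * d < n then
            if PySem.Int.mod n d = 0 then false else trialAux k n (d + 1)
          else d * d == n) from rfl]
    by_cases hlt : d * d < n
    · rw [if_pos hlt]
      by_cases hdvd : PySem.Int.mod n d = 0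
      · rw [if_pos hdvd]
        have hdvd' : d ∣ n := (PySem.Int.mod_eq_zero_iff_dvd n d).mp hdvd
        apply iff_of_false (by simp)
        rintro ⟨p, hdp, hpp, hmin⟩
        rcases eq_or_lt_of_le hdp with h | h
        · subst h; omega
        · exact hmin d le_rfl h hdvd'
      · rw [if_neg hdvd]
        have hdvd' : ¬ d ∣ n := fun h => hdvd ((PySem.Int.mod_eq_zero_iff_dvd n d).mpr h)
        have hdd : d ≤ d * d := by nlinarith [mul_self_nonneg (d - 1)]
        rw [ih n (d + 1) (by omega) (by omega)]
        constructor
        · rintro ⟨p, hdp, hpp, hmin⟩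
          refine ⟨p, by omega, hpp, ?_⟩
          intro q hq2 hqp hqdvd
          rcases eq_or_lt_of_le hq2 with h | h
          · exact hdvd' (h ▸ hqdvd)
          · exact hmin q (by omega) hqp hqdvd
        · rintro ⟨p, hdp, hpp, hmin⟩
          have hpd : p ≠ d := fun h => by rw [← h] at hlt; omega
          exact ⟨p, by omega, hpp, fun q hq hqp => hmin q (by omega) hqp⟩
    · rw [if_neg hlt]
      exact sqHit_iff n d hd (by omega)

-- A's characterization for n ≥ 3.
theorem f_eq_true_iff (n : Int) (hn : 3 ≤ n) : f n = true ↔ SqOfLeast n := by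
  have hx : PySem.Int.bxor n 0 = n := by simp
  have hfd : PySem.Int.floordiv (n * n) n = n := by
    rw [PySem.Int.floordiv_eq_ediv_of_pos (by omega)]
    exact Int.mul_ediv_cancel_left n (by omega)
  have h3 : (2 : Int) * n ≠ n - 1 := by omega
  have h4 : n ^ (0 : Nat) + 1 ≠ 1 := by simp
  have hbody : (fun (c : Int) i =>
      if PySem.Int.bxor n 0 = n then
        if PySem.Int.floordiv (n * n) n = n then
          if 2 * n ≠ n - 1 then
            if n ^ (0 : Nat) + 1 ≠ 1 then
              (if whileSub n i = 0 then c + 1 else c)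
            else c
          else c
        else c
      else c)
      = fun (c : Int) i => if whileSub n i = 0 then c + 1 else c := by
    funext c i
    rw [if_pos hx, if_pos hfd, if_pos h3, if_pos h4]
  rw [f, hbody, PySem.List.foldl_ite_add_one (fun i => whileSub n i = 0), zero_add,
    beq_iff_eq,
    show (((PySem.List.pyRange 2 n 1).countP
        (fun i => decide (whileSub n i = 0)) : Int) = 1)
      ↔ (PySem.List.pyRange 2 n 1).countP (fun i => decide (whileSub n i = 0)) = 1 from by omega,
    countP_eq_one_iff _ _ (PySem.List.nodup_pyRange_one 2 n),
    ← unique_divisor_iff_sqOfLeast n hn]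
  simp only [decide_eq_true_eq, PySem.List.mem_pyRange_one]
  constructor
  · rintro ⟨a, ⟨ha2, han⟩, hw, hu⟩
    refine ⟨a, ⟨ha2, han⟩,
      (whileSub_eq_zero_iff n a (by omega) (by omega)).mp hw, ?_⟩
    intro b hb2 hbn hbd
    exact hu b ⟨hb2, hbn⟩ ((whileSub_eq_zero_iff n b (by omega) (by omega)).mpr hbd)
  · rintro ⟨a, ⟨ha2, han⟩, hdvd, hu⟩
    refine ⟨a, ⟨ha2, han⟩,
      (whileSub_eq_zero_iff n a (by omega) (by omega)).mpr hdvd, ?_⟩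
    intro b ⟨hb2, hbn⟩ hw
    exact hu b hb2 hbn ((whileSub_eq_zero_iff n b (by omega) (by omega)).mp hw)

-- ===== VERDICT (by name: the statement is the Claim_ definition above) =====
theorem f_spec : Claim_equal_f := by
  intro n _
  unfold Spec_f
  by_cases h2 : n ≤ 2
  · unfold f f_alt
    rw [PySem.List.pyRange_one_eq_nil (by omega), if_pos (show n < 4 by omega)]
    rfl
  · have hn3 : 3 ≤ n := by omega
    have hiffA := f_eq_true_iff n hn3
    by_cases h3 : n = 3
    · subst h3
      have hA : f 3 = false := by
        cases hf : f 3 with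
        | false => rfl
        | true =>
          exfalso
          obtain ⟨p, hp2, hpp, -⟩ := hiffA.mp hf
          nlinarith
      rw [hA]
      rfl
    · have hB : f_alt n = trialAux (n - 2).toNat n 2 := by
        unfold f_alt
        rw [if_neg (by omega)]
      rw [hB, Bool.eq_iff_iff, hiffA,
        trialAux_eq_true_iff (n - 2).toNat n 2 (by omega) (by omega)]
      exact Iff.rfl
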